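-- pv_equiv track=rewrite | github.com/winterash2/TIL | 2021-06-24-부캠 코테/2.py | solution
-- ===== SOURCE A (Python) =====
-- def solution(param0):
--     answer = ''
--     answerConcat = ''
--     idx = 0
--
--     for elem in param0:
--         if elem == "BOOL":
--             answerConcat += '#'
--             idx += 1
--         elif elem == "SHORT":
--             padLen = 2 - idx % 2 if idx % 2 != 0 else 0
--             for _ in range(padLen):
--                 answerConcat += '.'
--             answerConcat += "##"
--             idx += padLen + 2
--         elif elem == "FLOAT":
--             padLen = 4 - idx % 4 if idx % 4 != 0 else 0
--             for _ in range(padLen):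
--                 answerConcat += '.'
--             answerConcat += "####"
--             idx += padLen + 4
--         elif elem == "INT":
--             padLen = 8 - idx % 8 if idx % 8 != 0 else 0
--             for _ in range(padLen):
--                 answerConcat += '.'
--             answerConcat += "########"
--             idx += padLen + 8
--         elif elem == "LONG":
--             padLen = 8 - idx % 8 if idx % 8 != 0 else 0
--             for _ in range(padLen):
--                 answerConcat += '.'
--             answerConcat += "################"
--             idx += padLen + 16
--
--     # 마지막 패딩
--     padLen = 8 - idx % 8 if idx % 8 != 0 else 0
--     for _ in range(padLen):
--         answerConcat += '.'
--
--     # 128 바이트를 넘으면 HALT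
--     if len(answerConcat) > 128:
--         answer = "HALT"
--     # 아닌 경우 8바이트마다 ,를 추가하면서 answer 생성
--     else:
--         for idx, char in enumerate(answerConcat):
--             if idx % 8 == 0 and idx != 0:
--                 answer += ','
--             answer += char
--
--     return answer
-- ===== SOURCE B (Python) =====
-- TABLE = {"BOOL": (1, 1), "SHORT": (2, 2), "FLOAT": (4, 4),
--          "INT": (8, 8), "LONG": (8, 16)}
--
--
-- def solution(param0):
--     layout = ''
--     idx = 0
--     for elem in param0:
--         info = TABLE.get(elem)
--         if info is not None:
--             align, width = info
--             pad = (align - idx % align) % align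
--             layout += '.' * pad + '#' * width
--             idx += pad + width
--     layout += '.' * ((8 - idx % 8) % 8)
--     if len(layout) > 128:
--         return "HALT"
--     chunks = []
--     rest = layout
--     while rest:
--         chunks.append(rest[:8])
--         rest = rest[8:]
--     return ','.join(chunks)
-- ===== Notes on version B (the rewrite author's own statement) =====
-- stated objective: simpler
-- what changed: Replaces the five-branch elif chain with a single table-driven loop over a type->(alignment,width) dict using one uniform pad formula (align - idx % align) % align, and replaces the index-tracking comma-insertion loop with slicing the layout into 8-character chunks joined by ','.
import Mathlib
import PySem

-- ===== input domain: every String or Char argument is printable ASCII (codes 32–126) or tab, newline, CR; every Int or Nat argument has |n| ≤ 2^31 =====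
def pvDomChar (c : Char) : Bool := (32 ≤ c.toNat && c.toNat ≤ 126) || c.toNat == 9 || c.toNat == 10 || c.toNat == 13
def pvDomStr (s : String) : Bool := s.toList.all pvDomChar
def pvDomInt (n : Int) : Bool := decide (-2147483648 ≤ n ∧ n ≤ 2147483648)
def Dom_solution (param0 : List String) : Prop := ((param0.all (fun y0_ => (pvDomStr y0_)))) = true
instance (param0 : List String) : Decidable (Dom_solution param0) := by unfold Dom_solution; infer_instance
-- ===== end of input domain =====

-- B replaces A's five-branch elif chain by one table-driven loop (dict type→(align,width),
-- uniform pad formula) and A's indexed comma loop by chunk-into-8-and-join; objective: simpler.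

-- ===== PORT A =====
-- one iteration of A's for-loop: the elif chain over (answerConcat, idx)
def stepA (st : List Char × Nat) (elem : String) : List Char × Nat :=
  if elem = "BOOL" then (st.1 ++ ['#'], st.2 + 1)
  else if elem = "SHORT" then
    let padLen := if st.2 % 2 ≠ 0 then 2 - st.2 % 2 else 0
    (st.1 ++ List.replicate padLen '.' ++ List.replicate 2 '#', st.2 + (padLen + 2))
  else if elem = "FLOAT" then
    let padLen := if st.2 % 4 ≠ 0 then 4 - st.2 % 4 else 0
    (st.1 ++ List.replicate padLen '.' ++ List.replicate 4 '#', st.2 + (padLen + 4))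
  else if elem = "INT" then
    let padLen := if st.2 % 8 ≠ 0 then 8 - st.2 % 8 else 0
    (st.1 ++ List.replicate padLen '.' ++ List.replicate 8 '#', st.2 + (padLen + 8))
  else if elem = "LONG" then
    let padLen := if st.2 % 8 ≠ 0 then 8 - st.2 % 8 else 0
    (st.1 ++ List.replicate padLen '.' ++ List.replicate 16 '#', st.2 + (padLen + 16))
  else st

-- one iteration of A's final `for idx, char in enumerate(answerConcat)` loop
def enumStepA (answer : List Char) (p : Int × Char) : List Char :=
  (if PySem.Int.mod p.1 8 = 0 ∧ p.1 ≠ 0 then answer ++ [','] else answer) ++ [p.2]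

def solution (param0 : List String) : String :=
  let st := param0.foldl stepA ([], 0)
  let padLen := if st.2 % 8 ≠ 0 then 8 - st.2 % 8 else 0
  let conc := st.1 ++ List.replicate padLen '.'
  if conc.length > 128 then "HALT"
  else String.ofList ((PySem.List.enumerate conc).foldl enumStepA [])

-- ===== PORT B =====
def tableB : PySem.Dict String (Nat × Nat) :=
  PySem.Dict.ofList [("BOOL", (1, 1)), ("SHORT", (2, 2)), ("FLOAT", (4, 4)),
                     ("INT", (8, 8)), ("LONG", (8, 16))]

-- one iteration of B's unified table-driven loop
def stepB (st : List Char × Nat) (elem : String) : List Char × Nat :=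
  match tableB.get? elem with
  | none => st
  | some (align, width) =>
    let pad := (align - st.2 % align) % align
    (st.1 ++ (List.replicate pad '.' ++ List.replicate width '#'), st.2 + (pad + width))

-- B's while-loop slicing the layout into pieces of 8
def chunksB : List Char → List (List Char)
  | [] => []
  | c :: t => (c :: t).take 8 :: chunksB (t.drop 7)
  termination_by s => s.length
  decreasing_by simp

def solution_alt (param0 : List String) : String :=
  let st := param0.foldl stepB ([], 0)
  let layout := st.1 ++ List.replicate ((8 - st.2 % 8) % 8) '.'
  if layout.length > 128 then "HALT"
  else String.ofList (List.intercalate [','] (chunksB layout))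

-- ===== PRECONDITION & SPEC =====
def Spec_solution (param0 : List String) (out : String) : Prop := out = solution_alt param0
instance (param0 : List String) (out : String) : Decidable (Spec_solution param0 out) := by unfold Spec_solution; infer_instance

-- ===== CLAIM (what is proved, stated in full; the proofs are below) =====
def Claim_equal_solution : Prop := ∀ (param0 : List String), Dom_solution param0 → Spec_solution param0 (solution param0)

-- ===== LEMMAS AND PROOFS =====

-- A's comma loop, written recursively with explicit running index
def gA : List Char → Int → List Char
  | [], _ => []
  | c :: t, i => (if i % 8 = 0 ∧ i ≠ 0 then [','] else []) ++ c :: gA t (i + 1)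

theorem chunksB_nil : chunksB [] = [] := by rw [chunksB]

theorem chunksB_cons (c : Char) (t : List Char) :
    chunksB (c :: t) = (c :: t).take 8 :: chunksB (t.drop 7) := by rw [chunksB]

theorem padEq (i k : Nat) (hk : 0 < k) :
    (if i % k ≠ 0 then k - i % k else 0) = (k - i % k) % k := by
  have h := Nat.mod_lt i hk
  split_ifs with h0
  · exact (Nat.mod_eq_of_lt (by omega)).symm
  · simp at h0; simp [h0]

theorem stepA_eq_stepB : stepA = stepB := by
  have hmk : tableB = PySem.Dict.mk [("BOOL", (1, 1)), ("SHORT", (2, 2)), ("FLOAT", (4, 4)),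
      ("INT", (8, 8)), ("LONG", (8, 16))] := by decide
  funext st elem
  unfold stepA stepB
  by_cases g1 : elem = "BOOL"
  · subst g1
    simp [show tableB.get? "BOOL" = some (1, 1) from by decide, Nat.mod_one]
  by_cases g2 : elem = "SHORT"
  · subst g2
    simp only [show tableB.get? "SHORT" = some (2, 2) from by decide,
      if_neg (by decide : ¬("SHORT" : String) = "BOOL")]
    rw [padEq st.2 2 (by omega)]
    simp [List.append_assoc]
  by_cases g3 : elem = "FLOAT"
  · subst g3
    simp only [show tableB.get? "FLOAT" = some (4, 4) from by decide,
      if_neg (by decide : ¬("FLOAT" : String) = "BOOL"),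
      if_neg (by decide : ¬("FLOAT" : String) = "SHORT")]
    rw [padEq st.2 4 (by omega)]
    simp [List.append_assoc]
  by_cases g4 : elem = "INT"
  · subst g4
    simp only [show tableB.get? "INT" = some (8, 8) from by decide,
      if_neg (by decide : ¬("INT" : String) = "BOOL"),
      if_neg (by decide : ¬("INT" : String) = "SHORT"),
      if_neg (by decide : ¬("INT" : String) = "FLOAT")]
    rw [padEq st.2 8 (by omega)]
    simp [List.append_assoc]
  by_cases g5 : elem = "LONG"
  · subst g5
    simp only [show tableB.get? "LONG" = some (8, 16) from by decide,
      if_neg (by decide : ¬("LONG" : String) = "BOOL"),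
      if_neg (by decide : ¬("LONG" : String) = "SHORT"),
      if_neg (by decide : ¬("LONG" : String) = "FLOAT"),
      if_neg (by decide : ¬("LONG" : String) = "INT")]
    rw [padEq st.2 8 (by omega)]
    simp [List.append_assoc]
  · have hnone : tableB.get? elem = none := by
      rw [hmk]
      simp only [PySem.Dict.get?_mk_cons]
      rw [if_neg (by simp [Ne.symm g1]), if_neg (by simp [Ne.symm g2]),
        if_neg (by simp [Ne.symm g3]), if_neg (by simp [Ne.symm g4]),
        if_neg (by simp [Ne.symm g5])]
      rfl
    simp [hnone, g1, g2, g3, g4, g5]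

theorem foldl_enum (s : List Char) (i : Int) (a : List Char) :
    (PySem.List.enumerate s i).foldl enumStepA a = a ++ gA s i := by
  induction s generalizing i a with
  | nil => simp [PySem.List.enumerate_nil, gA]
  | cons c t ih =>
    rw [PySem.List.enumerate_cons]
    simp only [List.foldl_cons, ih, enumStepA, gA,
      PySem.Int.mod_eq_emod_of_pos (a := i) (by norm_num : (0:Int) < 8)]
    split_ifs <;> simp

theorem gA_skip (k : Nat) : ∀ (s : List Char) (i : Int),
    (∀ j : Nat, j < k → ¬((i + j) % 8 = 0 ∧ i + (j : Int) ≠ 0)) →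
    gA s i = s.take k ++ gA (s.drop k) (i + k) := by
  induction k with
  | zero => intro s i _; simp
  | succ k ih =>
    intro s i h
    cases s with
    | nil => simp [gA]
    | cons c t =>
      have h0 : ¬(i % 8 = 0 ∧ i ≠ 0) := by
        have := h 0 (by omega); simpa using this
      rw [gA, if_neg h0]
      rw [ih t (i + 1) (by
        intro j hj
        have := h (j + 1) (by omega)
        push_cast at this ⊢
        omega)]
      simp only [List.take_succ_cons, List.drop_succ_cons, List.nil_append, List.cons_append]
      have : i + 1 + (k : Int) = i + ((k : Nat) + 1 : Nat) := by push_cast; ring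
      rw [this]

theorem gA_flat : ∀ (n : Nat) (s : List Char), s.length ≤ n → ∀ (i : Int),
    i % 8 = 0 → 0 < i → gA s i = (chunksB s).flatMap (fun c => ',' :: c) := by
  intro n
  induction n with
  | zero =>
    intro s hs i _ _
    have : s = [] := List.eq_nil_of_length_eq_zero (by omega)
    simp [this, gA, chunksB_nil]
  | succ n ih =>
    intro s hs i h8 hpos
    cases s with
    | nil => simp [gA, chunksB_nil]
    | cons c t =>
      rw [gA, if_pos ⟨h8, by omega⟩]
      rw [gA_skip 7 t (i + 1) (by intro j hj; omega)]
      rw [show ((7:Nat):Int) = 7 from rfl]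
      rw [ih (t.drop 7) (by simp at hs ⊢; omega) (i + 1 + 7) (by omega) (by omega)]
      rw [chunksB_cons]
      simp [List.take_succ_cons]

theorem interc : ∀ (rest : List (List Char)) (h : List Char),
    List.intercalate [','] (h :: rest) = h ++ rest.flatMap (fun c => ',' :: c) := by
  intro rest
  induction rest with
  | nil => intro h; simp [List.intercalate]
  | cons h2 t ih =>
    intro h
    rw [show List.intercalate [','] (h :: h2 :: t)
          = h ++ [','] ++ List.intercalate [','] (h2 :: t) from by
      simp [List.intercalate, List.intersperse]]
    rw [ih h2]
    simp

theorem gA_zero (s : List Char) :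
    gA s 0 = List.intercalate [','] (chunksB s) := by
  cases s with
  | nil => simp [gA, chunksB_nil, List.intercalate]
  | cons c t =>
    rw [gA, if_neg (by simp)]
    rw [show (0:Int) + 1 = 1 from rfl]
    rw [gA_skip 7 t 1 (by intro j hj; omega)]
    rw [show ((7:Nat):Int) = 7 from rfl]
    rw [gA_flat (t.drop 7).length (t.drop 7) le_rfl (1 + 7) (by norm_num) (by norm_num)]
    rw [chunksB_cons, interc]
    simp [List.take_succ_cons]

-- ===== VERDICT (by name: the statement is the Claim_ definition above) =====
theorem solution_spec : Claim_equal_solution := by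
  intro param0 _
  unfold Spec_solution
  simp only [solution, solution_alt, stepA_eq_stepB,
    padEq (List.foldl stepB ([], 0) param0).2 8 (by omega)]
  split_ifs with h
  · rfl
  · rw [foldl_enum, List.nil_append, gA_zero]
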